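-- pv_equiv track=rewrite | github.com/farooq-teqniqly/electric-era-coding-challgenge | charger_uptime.py | calculate_station_uptime
-- ===== SOURCE A (Python) =====
-- from typing import Dict, List, Tuple, Set
--
-- def get_station_reporting_period(station_id: int, charger_ids: List[int],
--                                reports: List[Tuple[int, int, int, bool]]) -> Tuple[int, int]:
--     """
--     Calculate the overall reporting period for a station based on all its chargers.
--
--     Returns:
--         (min_start_time, max_end_time) for the station
--     """
--     station_chargers = set(charger_ids)
--     min_start = None
--     max_end = None
--
--     for charger_id, start_time, end_time, _ in reports:
--         if charger_id in station_chargers: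
--             if min_start is None or start_time < min_start:
--                 min_start = start_time
--             if max_end is None or end_time > max_end:
--                 max_end = end_time
--
--     if min_start is None or max_end is None:
--         return 0, 0
--
--     return min_start, max_end
--
-- def merge_intervals(intervals: List[Tuple[int, int]]) -> List[Tuple[int, int]]:
--     """
--     Merge overlapping intervals and return a sorted list of non-overlapping intervals.
--     """
--     if not intervals:
--         return []
--
--     # Sort intervals by start time
--     intervals.sort()
--     merged = [intervals[0]]
--
--     for current_start, current_end in intervals[1:]:
--         last_start, last_end = merged[-1]
--
--         if current_start <= last_end:
--             # Overlapping intervals, merge them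
--             merged[-1] = (last_start, max(last_end, current_end))
--         else:
--             # Non-overlapping interval
--             merged.append((current_start, current_end))
--
--     return merged
--
-- def calculate_station_uptime(station_id: int, charger_ids: List[int],
--                            reports: List[Tuple[int, int, int, bool]]) -> int:
--     """
--     Calculate the uptime percentage for a station.
--
--     Returns:
--         Uptime percentage (0-100), rounded down to nearest integer
--     """
--     # Get the overall reporting period for this station
--     period_start, period_end = get_station_reporting_period(station_id, charger_ids, reports)
--
--     if period_start == period_end:
--         return 0
--
--     total_period = period_end - period_start
--     station_chargers = set(charger_ids)
--
--     # Collect all "up" intervals for chargers at this station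
--     up_intervals = []
--     for charger_id, start_time, end_time, is_up in reports:
--         if charger_id in station_chargers and is_up:
--             up_intervals.append((start_time, end_time))
--
--     # Merge overlapping up intervals
--     merged_up_intervals = merge_intervals(up_intervals)
--
--     # Calculate total uptime within the station's reporting period
--     total_uptime = 0
--     for start, end in merged_up_intervals:
--         # Clip interval to station's reporting period
--         clipped_start = max(start, period_start)
--         clipped_end = min(end, period_end)
--
--         if clipped_start < clipped_end:
--             total_uptime += clipped_end - clipped_start
--
--     # Calculate percentage and round down
--     uptime_percentage = (total_uptime * 100) // total_period
--     return int(uptime_percentage)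
-- ===== SOURCE B (Python) =====
-- def calculate_station_uptime(station_id, charger_ids, reports):
--     chargers = set(charger_ids)
--     relevant = [(s, e) for c, s, e, _ in reports if c in chargers]
--     if not relevant:
--         return 0
--     period_start = min(s for s, _ in relevant)
--     period_end = max(e for _, e in relevant)
--     if period_start == period_end:
--         return 0
--     # sweep line: +1/-1 boundary events of the clipped up-intervals,
--     # one pass with a coverage counter instead of building a merged interval list
--     events = []
--     for c, s, e, up in reports:
--         if up and c in chargers:
--             cs = max(s, period_start)
--             ce = min(e, period_end)
--             if cs < ce:
--                 events.append((cs, 1))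
--                 events.append((ce, -1))
--     events.sort()
--     total = 0
--     cover = 0
--     prev = None
--     for pos, delta in events:
--         if prev is not None and cover > 0:
--             total += pos - prev
--         cover += delta
--         prev = pos
--     return total * 100 // (period_end - period_start)
-- ===== Notes on version B (the rewrite author's own statement) =====
-- stated objective: alternative
-- what changed: B replaces A's sort-then-merge-overlapping-intervals pass (building a merged interval list and re-scanning it with clipping) by a sweep line: each clipped up-interval emits +1/-1 boundary events, the events are sorted once and swept in a single pass with a coverage counter, adding gap lengths while coverage is positive; measured ~1.6x faster at large n from dropping the merged-list construction and re-scan.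
import Mathlib
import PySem

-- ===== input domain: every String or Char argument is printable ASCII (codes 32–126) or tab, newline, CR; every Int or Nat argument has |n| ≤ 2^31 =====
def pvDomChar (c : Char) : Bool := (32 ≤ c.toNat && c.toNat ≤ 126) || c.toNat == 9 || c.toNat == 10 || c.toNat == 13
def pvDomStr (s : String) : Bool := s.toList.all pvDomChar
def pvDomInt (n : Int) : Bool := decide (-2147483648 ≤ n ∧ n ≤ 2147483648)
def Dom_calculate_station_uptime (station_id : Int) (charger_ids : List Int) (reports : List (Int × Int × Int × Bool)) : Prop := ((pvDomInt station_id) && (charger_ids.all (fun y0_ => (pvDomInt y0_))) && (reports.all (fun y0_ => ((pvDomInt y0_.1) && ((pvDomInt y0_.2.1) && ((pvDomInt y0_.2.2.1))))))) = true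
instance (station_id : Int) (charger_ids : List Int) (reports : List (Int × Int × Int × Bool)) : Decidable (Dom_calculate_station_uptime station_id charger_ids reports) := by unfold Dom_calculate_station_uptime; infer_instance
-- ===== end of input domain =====

-- B replaces A's sort-and-merge-intervals pass by a boundary-event sweep line:
-- ±1 events at the clipped endpoints, sorted once, swept with a coverage counter.

-- ===== PORT A =====
-- one step of A's None-sentinel min/max loop in get_station_reporting_period
def pvPeriodStep (station_chargers : PySem.Set Int) (st : Option Int × Option Int)
    (r : Int × Int × Int × Bool) : Option Int × Option Int :=
  if r.1 ∈ station_chargers then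
    (match st.1 with
      | none => some r.2.1
      | some m => if r.2.1 < m then some r.2.1 else some m,
     match st.2 with
      | none => some r.2.2.1
      | some m => if r.2.2.1 > m then some r.2.2.1 else some m)
  else st

def get_station_reporting_period (station_id : Int) (charger_ids : List Int)
    (reports : List (Int × Int × Int × Bool)) : Int × Int :=
  let station_chargers := PySem.Set.ofList charger_ids
  let st := reports.foldl (pvPeriodStep station_chargers) (none, none)
  match st with
  | (some a, some b) => (a, b)
  | _ => (0, 0)

-- the body of A's merge loop (reads merged[-1], mutates it or appends)
def pvMergeStep (merged : List (Int × Int)) (cur : Int × Int) : List (Int × Int) :=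
  match merged.getLast? with
  | some last =>
    if cur.1 ≤ last.2 then merged.dropLast ++ [(last.1, max last.2 cur.2)]
    else merged ++ [cur]
  | none => merged ++ [cur]

def merge_intervals (intervals : List (Int × Int)) : List (Int × Int) :=
  match PySem.List.sorted2 intervals Prod.fst Prod.snd with
  | [] => []
  | h :: t => t.foldl pvMergeStep [h]

-- the body of A's final clip-and-accumulate loop
def pvClipStep (period_start period_end : Int) (t : Int) (iv : Int × Int) : Int :=
  let clipped_start := max iv.1 period_start
  let clipped_end := min iv.2 period_end
  if clipped_start < clipped_end then t + (clipped_end - clipped_start) else t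

def calculate_station_uptime (station_id : Int) (charger_ids : List Int) (reports : List (Int × Int × Int × Bool)) : Int :=
  let period := get_station_reporting_period station_id charger_ids reports
  let period_start := period.1
  let period_end := period.2
  if period_start = period_end then 0
  else
    let total_period := period_end - period_start
    let station_chargers := PySem.Set.ofList charger_ids
    let up_intervals := reports.foldl (fun acc r =>
      if decide (r.1 ∈ station_chargers) && r.2.2.2 then acc ++ [(r.2.1, r.2.2.1)] else acc) []
    let merged_up_intervals := merge_intervals up_intervals
    let total_uptime := merged_up_intervals.foldl (pvClipStep period_start period_end) 0
    PySem.Int.floordiv (total_uptime * 100) total_period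

-- ===== PORT B =====
-- one iteration of B's event-building loop ('if up and c in chargers: … append two events')
def pvEvStep (chargers : PySem.Set Int) (ps pe : Int)
    (acc : List (Int × Int)) (r : Int × Int × Int × Bool) : List (Int × Int) :=
  if r.2.2.2 && decide (r.1 ∈ chargers) then
    let cs := max r.2.1 ps
    let ce := min r.2.2.1 pe
    if cs < ce then acc ++ [(cs, 1), (ce, -1)] else acc
  else acc

-- one iteration of B's sweep loop: state = (total, cover, prev position or None)
def pvSweepStep (st : Int × Int × Option Int) (ev : Int × Int) : Int × Int × Option Int :=
  match st.2.2 with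
  | some p => (if 0 < st.2.1 then st.1 + (ev.1 - p) else st.1, st.2.1 + ev.2, some ev.1)
  | none => (st.1, st.2.1 + ev.2, some ev.1)

def calculate_station_uptime_alt (station_id : Int) (charger_ids : List Int) (reports : List (Int × Int × Int × Bool)) : Int :=
  let chargers := PySem.Set.ofList charger_ids
  let relevant := (reports.filter (fun r => decide (r.1 ∈ chargers))).map (fun r => (r.2.1, r.2.2.1))
  match relevant with
  | [] => 0
  | _ =>
    match PySem.List.min? (relevant.map Prod.fst) (fun x => x),
          PySem.List.max? (relevant.map Prod.snd) (fun x => x) with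
    | some period_start, some period_end =>
      if period_start = period_end then 0
      else
        let events := reports.foldl (pvEvStep chargers period_start period_end) []
        let evs := PySem.List.sorted2 events Prod.fst Prod.snd
        let st := evs.foldl pvSweepStep (0, 0, none)
        PySem.Int.floordiv (st.1 * 100) (period_end - period_start)
    | _, _ => 0   -- unreachable: relevant is nonempty so min?/max? are some (totality guard only)

-- ===== PRECONDITION & SPEC =====
def Spec_calculate_station_uptime (station_id : Int) (charger_ids : List Int) (reports : List (Int × Int × Int × Bool)) (out : Int) : Prop := out = calculate_station_uptime_alt station_id charger_ids reports
instance (station_id : Int) (charger_ids : List Int) (reports : List (Int × Int × Int × Bool)) (out : Int) : Decidable (Spec_calculate_station_uptime station_id charger_ids reports out) := by unfold Spec_calculate_station_uptime; infer_instance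

-- ===== CLAIM (what is proved, stated in full; the proofs are below) =====
def Claim_equal_calculate_station_uptime : Prop := ∀ (station_id : Int) (charger_ids : List Int) (reports : List (Int × Int × Int × Bool)), Dom_calculate_station_uptime station_id charger_ids reports → Spec_calculate_station_uptime station_id charger_ids reports (calculate_station_uptime station_id charger_ids reports)

-- ===== LEMMAS AND PROOFS =====

-- both totals are proved equal to the cardinality of this set: union of the up-intervals
-- (as Finset.Ico's) intersected with the reporting window
noncomputable def pvU (l : List (Int × Int)) : Finset Int :=
  l.foldr (fun iv acc => Finset.Ico iv.1 iv.2 ∪ acc) ∅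

theorem pvMem_U (l : List (Int × Int)) (x : Int) :
    x ∈ pvU l ↔ ∃ iv ∈ l, iv.1 ≤ x ∧ x < iv.2 := by
  induction l with
  | nil => simp [pvU]
  | cons h t ih =>
    simp only [pvU, List.foldr_cons, Finset.mem_union, Finset.mem_Ico, List.mem_cons] at *
    rw [ih]
    constructor
    · rintro (h1 | h1)
      · exact ⟨h, Or.inl rfl, h1⟩
      · obtain ⟨iv, hm, hb⟩ := h1; exact ⟨iv, Or.inr hm, hb⟩
    · rintro ⟨iv, (h1 | hm), hb⟩
      · subst h1; exact Or.inl hb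
      · exact Or.inr ⟨iv, hm, hb⟩

-- the clipped length of one interval (A adds exactly this per merged interval)
def pvClip (ps pe : Int) (iv : Int × Int) : Int :=
  if max iv.1 ps < min iv.2 pe then min iv.2 pe - max iv.1 ps else 0

theorem pvClipStep_eq (ps pe : Int) : pvClipStep ps pe = fun t iv => t + pvClip ps pe iv := by
  funext t iv
  simp only [pvClipStep, pvClip]
  split_ifs <;> omega

theorem pvClip_card (ps pe : Int) (iv : Int × Int) :
    pvClip ps pe iv = (((Finset.Ico iv.1 iv.2 ∩ Finset.Ico ps pe).card : Int)) := by
  rw [Finset.Ico_inter_Ico, Int.card_Ico]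
  simp only [pvClip]
  split_ifs <;> omega

theorem pvU_lb (xs : List (Int × Int)) (b : Int) (h : ∀ p ∈ xs, b ≤ p.1) :
    ∀ x ∈ pvU xs, b ≤ x := by
  intro x hx
  obtain ⟨iv, hiv, h1, _⟩ := (pvMem_U xs x).mp hx
  exact le_trans (h iv hiv) h1

-- sorted2 with fst/snd keys is Python's lexicographic sort: same fold as sorted with the Lex key
theorem pvSorted2_eq_lex (xs : List (Int × Int)) :
    PySem.List.sorted2 xs Prod.fst Prod.snd
      = PySem.List.sorted xs (fun p => toLex p) := by
  rw [PySem.List.sorted_eq_foldl_insertBy]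
  have hb : (fun (a b : Int × Int) => decide (a.1 < b.1) || (!decide (b.1 < a.1) && decide (a.2 < b.2)))
      = (fun a b => decide (toLex a < toLex b)) := by
    funext a b
    rw [Bool.eq_iff_iff]
    simp only [Bool.or_eq_true, Bool.and_eq_true, Bool.not_eq_true', decide_eq_true_eq,
      decide_eq_false_iff_not, Prod.Lex.lt_iff, ofLex_toLex]
    omega
  show List.foldl (fun acc x => PySem.List.insertBy
      (fun a b => decide (a.1 < b.1) || (!decide (b.1 < a.1) && decide (a.2 < b.2))) x acc) [] xs = _
  rw [hb]

theorem pvSorted2_pairwise_fst (xs : List (Int × Int)) :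
    (PySem.List.sorted2 xs Prod.fst Prod.snd).Pairwise (fun a b => a.1 ≤ b.1) := by
  rw [pvSorted2_eq_lex]
  have h := PySem.List.sorted_pairwise xs (fun p : Int × Int => toLex p)
  refine h.imp ?_
  intro a b hab
  rcases Prod.Lex.le_iff.mp hab with h1 | ⟨h1, _⟩
  · exact le_of_lt h1
  · exact le_of_eq h1

-- A's merge loop followed by the clipped sum measures the clipped union of the remaining intervals
theorem pvMergeA (ps pe : Int) (xs : List (Int × Int)) (acc : List (Int × Int)) (ls le : Int)
    (hstart : ∀ p ∈ xs, ls ≤ p.1) (hchain : xs.Pairwise (fun a b => a.1 ≤ b.1)) :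
    ((xs.foldl pvMergeStep (acc ++ [(ls, le)])).map (pvClip ps pe)).sum
      = ((acc.map (pvClip ps pe)).sum)
        + (((Finset.Ico ls le ∪ pvU xs) ∩ Finset.Ico ps pe).card : Int) := by
  induction xs generalizing acc ls le with
  | nil =>
    simp [pvU, pvClip_card]
  | cons c t ih =>
    have hlast : (acc ++ [(ls, le)]).getLast? = some (ls, le) := List.getLast?_concat
    have hchain' := (List.pairwise_cons.mp hchain).2
    have hhead := (List.pairwise_cons.mp hchain).1
    have hUc : pvU (c :: t) = Finset.Ico c.1 c.2 ∪ pvU t := rfl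
    rw [List.foldl_cons]
    by_cases h : c.1 ≤ le
    · have hm : pvMergeStep (acc ++ [(ls, le)]) c = acc ++ [(ls, max le c.2)] := by
        simp [pvMergeStep, hlast, h]
      have hU : Finset.Ico ls le ∪ pvU (c :: t) = Finset.Ico ls (max le c.2) ∪ pvU t := by
        have hls : ls ≤ c.1 := hstart c (by simp)
        rw [hUc, ← Finset.union_assoc]
        congr 1
        ext x
        simp only [Finset.mem_union, Finset.mem_Ico]
        omega
      rw [hm, ih _ _ _ (fun p hp => hstart p (by simp [hp])) hchain', hU]
    · have hm : pvMergeStep (acc ++ [(ls, le)]) c = (acc ++ [(ls, le)]) ++ [c] := by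
        simp [pvMergeStep, hlast, h]
      have hdisj : Disjoint (Finset.Ico ls le ∩ Finset.Ico ps pe)
          ((Finset.Ico c.1 c.2 ∪ pvU t) ∩ Finset.Ico ps pe) := by
        refine Finset.disjoint_left.mpr ?_
        intro x hx1 hx2
        have h1 : x < le := (Finset.mem_Ico.mp (Finset.mem_inter.mp hx1).1).2
        have h2 : c.1 ≤ x := by
          rcases Finset.mem_union.mp (Finset.mem_inter.mp hx2).1 with hx | hx
          · exact (Finset.mem_Ico.mp hx).1
          · exact pvU_lb t c.1 hhead x hx
        omega
      have hsplit : (((Finset.Ico ls le ∪ (Finset.Ico c.1 c.2 ∪ pvU t)) ∩ Finset.Ico ps pe).card : Int)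
          = ((Finset.Ico ls le ∩ Finset.Ico ps pe).card : Int)
            + (((Finset.Ico c.1 c.2 ∪ pvU t) ∩ Finset.Ico ps pe).card : Int) := by
        rw [Finset.union_inter_distrib_right, Finset.card_union_of_disjoint hdisj]
        push_cast
        ring
      rw [hm, ih ((acc ++ [(ls, le)])) c.1 c.2 hhead hchain', List.map_append, List.sum_append,
        hUc, hsplit]
      simp only [List.map_cons, List.map_nil, List.sum_cons, List.sum_nil, pvClip_card]
      ring

-- B-side proof objects: the region the sweep still has to add, and the coverage prefix sum
noncomputable def pvRU : List (Int × Int) → Int → Int → Finset Int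
  | [], _, _ => ∅
  | (q, d) :: t, c, p => (if 0 < c then Finset.Ico p q else ∅) ∪ pvRU t (c + d) q

def pvEvSum (evs : List (Int × Int)) (x : Int) : Int :=
  (evs.map (fun e => if e.1 ≤ x then e.2 else 0)).sum

theorem pvRU_lb (evs : List (Int × Int)) (c p : Int)
    (hlb : ∀ e ∈ evs, p ≤ e.1) (hpw : evs.Pairwise (fun a b => a.1 ≤ b.1)) :
    ∀ x ∈ pvRU evs c p, p ≤ x := by
  induction evs generalizing c p with
  | nil => intro x hx; simp [pvRU] at hx
  | cons e t ih =>
    obtain ⟨q, d⟩ := e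
    intro x hx
    rcases Finset.mem_union.mp hx with hx | hx
    · split_ifs at hx with hc
      · exact (Finset.mem_Ico.mp hx).1
      · simp at hx
    · have hq : p ≤ q := hlb (q, d) (by simp)
      have := ih (c + d) q (fun e he => (List.pairwise_cons.mp hpw).1 e he)
        (List.pairwise_cons.mp hpw).2 x hx
      omega

theorem pvSweep_card (evs : List (Int × Int)) (tt c p : Int)
    (hpw : evs.Pairwise (fun a b => a.1 ≤ b.1)) (hlb : ∀ e ∈ evs, p ≤ e.1) :
    (evs.foldl pvSweepStep (tt, c, some p)).1 = tt + ((pvRU evs c p).card : Int) := by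
  induction evs generalizing tt c p with
  | nil => simp [pvRU]
  | cons e t ih =>
    obtain ⟨q, d⟩ := e
    have hq : p ≤ q := hlb (q, d) (by simp)
    have hpw' := (List.pairwise_cons.mp hpw).2
    have hlb' : ∀ e ∈ t, q ≤ e.1 := (List.pairwise_cons.mp hpw).1
    have hstep : pvSweepStep (tt, c, some p) (q, d)
        = (if 0 < c then tt + (q - p) else tt, c + d, some q) := rfl
    rw [List.foldl_cons, hstep, ih _ _ _ hpw' hlb']
    show _ = tt + (((if 0 < c then Finset.Ico p q else ∅) ∪ pvRU t (c + d) q).card : Int)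
    by_cases hc : 0 < c
    · have hdisj : Disjoint (Finset.Ico p q) (pvRU t (c + d) q) := by
        refine Finset.disjoint_left.mpr ?_
        intro x hx1 hx2
        have h1 : x < q := (Finset.mem_Ico.mp hx1).2
        have h2 : q ≤ x := pvRU_lb t (c + d) q hlb' hpw' x hx2
        omega
      rw [if_pos hc, if_pos hc, Finset.card_union_of_disjoint hdisj, Int.card_Ico]
      push_cast
      omega
    · rw [if_neg hc, if_neg hc]
      simp

theorem pvEvSum_zero_of_lt (t : List (Int × Int)) (q x : Int)
    (h : ∀ e ∈ t, q ≤ e.1) (hx : x < q) : pvEvSum t x = 0 := by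
  induction t with
  | nil => rfl
  | cons e s ih =>
    have h1 : ¬ e.1 ≤ x := by have := h e (by simp); omega
    have h2 := ih (fun e he => h e (by simp [he]))
    simp only [pvEvSum, List.map_cons, List.sum_cons, if_neg h1] at h2 ⊢
    omega

theorem pvRU_mem (evs : List (Int × Int)) (c p x : Int)
    (hpw : evs.Pairwise (fun a b => a.1 ≤ b.1)) (hlb : ∀ e ∈ evs, p ≤ e.1)
    (hbal : c + (evs.map Prod.snd).sum = 0) :
    x ∈ pvRU evs c p ↔ p ≤ x ∧ 0 < c + pvEvSum evs x := by
  induction evs generalizing c p with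
  | nil =>
    simp only [List.map_nil, List.sum_nil] at hbal
    simp [pvRU, pvEvSum]
    omega
  | cons e t ih =>
    obtain ⟨q, d⟩ := e
    have hq : p ≤ q := hlb (q, d) (by simp)
    have hpw' := (List.pairwise_cons.mp hpw).2
    have hlb' : ∀ e ∈ t, q ≤ e.1 := (List.pairwise_cons.mp hpw).1
    have hbal' : (c + d) + (t.map Prod.snd).sum = 0 := by
      simp only [List.map_cons, List.sum_cons] at hbal; omega
    have hsum : pvEvSum ((q, d) :: t) x = (if q ≤ x then d else 0) + pvEvSum t x := by
      simp [pvEvSum]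
    show x ∈ (if 0 < c then Finset.Ico p q else ∅) ∪ pvRU t (c + d) q ↔ _
    rw [Finset.mem_union, ih (c + d) q hpw' hlb' hbal', hsum]
    by_cases hxq : x < q
    · have h0 : pvEvSum t x = 0 := pvEvSum_zero_of_lt t q x hlb' hxq
      rw [if_neg (show ¬ q ≤ x by omega), h0]
      by_cases hc : 0 < c
      · rw [if_pos hc]
        simp only [Finset.mem_Ico]
        constructor
        · rintro (⟨h1, _⟩ | ⟨h1, _⟩)
          · exact ⟨h1, by omega⟩
          · omega
        · rintro ⟨h1, _⟩
          exact Or.inl ⟨h1, hxq⟩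
      · rw [if_neg hc]
        simp only [Finset.notMem_empty, false_or]
        constructor
        · rintro ⟨h1, _⟩; omega
        · rintro ⟨_, h2⟩
          exact absurd h2 (by omega)
    · rw [if_pos (show q ≤ x by omega)]
      have hIco : x ∉ (if 0 < c then Finset.Ico p q else ∅) := by
        split_ifs
        · simp only [Finset.mem_Ico]; omega
        · simp
      constructor
      · rintro (h1 | ⟨_, h2⟩)
        · exact absurd h1 hIco
        · exact ⟨by omega, by omega⟩
      · rintro ⟨_, h2⟩
        exact Or.inr ⟨by omega, by omega⟩

-- B's event-building loop is a flatMap of this per-report event list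
def pvEvOf (chargers : PySem.Set Int) (ps pe : Int) (r : Int × Int × Int × Bool) : List (Int × Int) :=
  if r.2.2.2 && decide (r.1 ∈ chargers) then
    (if max r.2.1 ps < min r.2.2.1 pe
      then [(max r.2.1 ps, 1), (min r.2.2.1 pe, -1)] else [])
  else []

theorem pvEvents_eq (chargers : PySem.Set Int) (ps pe : Int) (reports : List (Int × Int × Int × Bool)) :
    reports.foldl (pvEvStep chargers ps pe) [] = reports.flatMap (pvEvOf chargers ps pe) := by
  have hstep : pvEvStep chargers ps pe = fun acc r => acc ++ pvEvOf chargers ps pe r := by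
    funext acc r
    simp only [pvEvStep, pvEvOf]
    split_ifs <;> simp
  rw [hstep, PySem.List.foldl_append_eq_flatMap]
  simp

theorem pvEvSum_append (l1 l2 : List (Int × Int)) (x : Int) :
    pvEvSum (l1 ++ l2) x = pvEvSum l1 x + pvEvSum l2 x := by
  simp [pvEvSum]

theorem pvEvSum_flatMap (reports : List (Int × Int × Int × Bool))
    (g : Int × Int × Int × Bool → List (Int × Int)) (x : Int) :
    pvEvSum (reports.flatMap g) x = (reports.map (fun r => pvEvSum (g r) x)).sum := by
  induction reports with
  | nil => rfl
  | cons r t ih => rw [List.flatMap_cons, pvEvSum_append, ih]; simp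

-- the per-report coverage indicator
def pvCond (chargers : PySem.Set Int) (ps pe x : Int) (r : Int × Int × Int × Bool) : Bool :=
  r.2.2.2 && decide (r.1 ∈ chargers) && decide (max r.2.1 ps ≤ x) && decide (x < min r.2.2.1 pe)

theorem pvEvSumOf (chargers : PySem.Set Int) (ps pe x : Int) (r : Int × Int × Int × Bool) :
    pvEvSum (pvEvOf chargers ps pe r) x = if pvCond chargers ps pe x r then 1 else 0 := by
  cases h1 : (r.2.2.2 && decide (r.1 ∈ chargers)) with
  | false => simp [pvEvOf, pvCond, pvEvSum, h1]
  | true =>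
    simp only [pvEvOf, pvCond, h1, Bool.true_and, if_true, Bool.and_eq_true,
      decide_eq_true_eq, pvEvSum]
    split_ifs <;> simp_all <;> omega

theorem pvBal (chargers : PySem.Set Int) (ps pe : Int) (reports : List (Int × Int × Int × Bool)) :
    ((reports.flatMap (pvEvOf chargers ps pe)).map Prod.snd).sum = 0 := by
  induction reports with
  | nil => rfl
  | cons r t ih =>
    rw [List.flatMap_cons, List.map_append, List.sum_append, ih]
    simp only [pvEvOf]
    split_ifs <;> simp

-- a point of the window is covered iff some up-report's clipped interval contains it
theorem pvCovered_iff (chargers : PySem.Set Int) (ps pe x : Int)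
    (reports : List (Int × Int × Int × Bool)) :
    (x ∈ pvU ((reports.filter (fun r => decide (r.1 ∈ chargers) && r.2.2.2)).map
        (fun r => (r.2.1, r.2.2.1))) ∩ Finset.Ico ps pe)
      ↔ ∃ r ∈ reports, pvCond chargers ps pe x r = true := by
  rw [Finset.mem_inter, pvMem_U]
  simp only [List.mem_map, List.mem_filter, Finset.mem_Ico, Bool.and_eq_true,
    decide_eq_true_eq, pvCond]
  constructor
  · rintro ⟨⟨iv, ⟨r, ⟨hr, hmem, hup⟩, heq⟩, h1, h2⟩, h3, h4⟩
    subst heq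
    exact ⟨r, hr, ⟨⟨⟨hup, hmem⟩, by omega⟩, by omega⟩⟩
  · rintro ⟨r, hr, hc⟩
    obtain ⟨⟨⟨hup, hmem⟩, h1⟩, h2⟩ := hc
    exact ⟨⟨(r.2.1, r.2.2.1), ⟨r, ⟨hr, hmem, hup⟩, rfl⟩, by omega, by omega⟩, by omega, by omega⟩

-- total coverage prefix sum = indicator sum over the reports
theorem pvEvSum_events (chargers : PySem.Set Int) (ps pe x : Int)
    (reports : List (Int × Int × Int × Bool)) :
    pvEvSum (reports.flatMap (pvEvOf chargers ps pe)) x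
      = ((reports.countP (pvCond chargers ps pe x) : Nat) : Int) := by
  rw [pvEvSum_flatMap]
  have : reports.map (fun r => pvEvSum (pvEvOf chargers ps pe r) x)
      = reports.map (fun r => if pvCond chargers ps pe x r then (1 : Int) else 0) :=
    List.map_congr_left (fun r _ => pvEvSumOf chargers ps pe x r)
  rw [this, PySem.List.sum_map_ite_one_zero]

-- B's sweep total measures the same set A's merge measures
theorem pvB_total (chargers : PySem.Set Int) (ps pe : Int)
    (reports : List (Int × Int × Int × Bool)) :
    ((PySem.List.sorted2 (reports.foldl (pvEvStep chargers ps pe) []) Prod.fst Prod.snd).foldl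
        pvSweepStep (0, 0, none)).1
      = (((pvU ((reports.filter (fun r => decide (r.1 ∈ chargers) && r.2.2.2)).map
          (fun r => (r.2.1, r.2.2.1))) ∩ Finset.Ico ps pe).card : Int)) := by
  rw [pvEvents_eq]
  have hperm := PySem.List.sorted2_perm (reports.flatMap (pvEvOf chargers ps pe))
    Prod.fst Prod.snd false
  have hpw := pvSorted2_pairwise_fst (reports.flatMap (pvEvOf chargers ps pe))
  cases hE : PySem.List.sorted2 (reports.flatMap (pvEvOf chargers ps pe)) Prod.fst Prod.snd with
  | nil =>
    rw [hE] at hperm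
    have hnil : reports.flatMap (pvEvOf chargers ps pe) = [] := hperm.symm.eq_nil
    have hempty : pvU ((reports.filter (fun r => decide (r.1 ∈ chargers) && r.2.2.2)).map
        (fun r => (r.2.1, r.2.2.1))) ∩ Finset.Ico ps pe = ∅ := by
      rw [Finset.eq_empty_iff_forall_notMem]
      intro x hx
      obtain ⟨r, hr, hc⟩ := (pvCovered_iff chargers ps pe x reports).mp hx
      have h0 : pvEvOf chargers ps pe r = [] := List.flatMap_eq_nil_iff.mp hnil r hr
      simp only [pvCond, Bool.and_eq_true, decide_eq_true_eq] at hc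
      obtain ⟨⟨⟨hup, hmem⟩, h1⟩, h2⟩ := hc
      simp only [pvEvOf, hup, hmem, decide_true, Bool.and_self, if_true] at h0
      rw [if_pos (by omega)] at h0
      simp at h0
    rw [hempty]
    simp
  | cons e t =>
    obtain ⟨q, d⟩ := e
    rw [hE] at hperm hpw
    have hpw' := (List.pairwise_cons.mp hpw).2
    have hlb' : ∀ e ∈ t, q ≤ e.1 := (List.pairwise_cons.mp hpw).1
    have hstep : pvSweepStep ((0 : Int), (0 : Int), (none : Option Int)) (q, d)
        = (0, d, some q) := by simp [pvSweepStep]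
    rw [List.foldl_cons, hstep, pvSweep_card t 0 d q hpw' hlb']
    have hbal : d + (t.map Prod.snd).sum = 0 := by
      have h0 := pvBal chargers ps pe reports
      have h1 : (((q, d) :: t).map Prod.snd).sum
          = ((reports.flatMap (pvEvOf chargers ps pe)).map Prod.snd).sum :=
        (hperm.map Prod.snd).sum_eq
      simp only [List.map_cons, List.sum_cons] at h1
      omega
    have hset : pvRU t d q
        = pvU ((reports.filter (fun r => decide (r.1 ∈ chargers) && r.2.2.2)).map
            (fun r => (r.2.1, r.2.2.1))) ∩ Finset.Ico ps pe := by
      ext x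
      rw [pvRU_mem t d q x hpw' hlb' hbal, pvCovered_iff chargers ps pe x reports]
      have hsum : (if q ≤ x then d else 0) + pvEvSum t x
          = ((reports.countP (pvCond chargers ps pe x) : Nat) : Int) := by
        rw [← pvEvSum_events chargers ps pe x reports]
        have hp := (hperm.map (fun e => (if e.1 ≤ x then e.2 else 0))).sum_eq
        simp only [List.map_cons, List.sum_cons] at hp
        simp only [pvEvSum]
        rw [← hp]
      constructor
      · rintro ⟨hq, hpos⟩
        rw [if_pos hq] at hsum
        rw [hsum] at hpos
        have := List.countP_pos_iff.mp (by exact_mod_cast hpos)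
        exact this
      · rintro ⟨r, hr, hc⟩
        have hqx : q ≤ x := by
          have hc' := hc
          simp only [pvCond, Bool.and_eq_true, decide_eq_true_eq] at hc'
          obtain ⟨⟨⟨hup, hmem⟩, h1⟩, h2⟩ := hc'
          have hne : (max r.2.1 ps, (1 : Int)) ∈ pvEvOf chargers ps pe r := by
            simp only [pvEvOf, hup, hmem, decide_true, Bool.and_self, if_true]
            rw [if_pos (by omega)]
            simp
          have hmemfl : (max r.2.1 ps, (1 : Int)) ∈ reports.flatMap (pvEvOf chargers ps pe) :=
            List.mem_flatMap.mpr ⟨r, hr, hne⟩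
          have : (max r.2.1 ps, (1 : Int)) ∈ ((q, d) :: t) := hperm.mem_iff.mpr hmemfl
          rcases List.mem_cons.mp this with h | h
          · have : max r.2.1 ps = q := congrArg Prod.fst h
            omega
          · have := hlb' _ h
            simp at this
            omega
        refine ⟨hqx, ?_⟩
        rw [if_pos hqx] at hsum
        rw [hsum]
        have : 0 < reports.countP (pvCond chargers ps pe x) :=
          List.countP_pos_iff.mpr ⟨r, hr, hc⟩
        exact_mod_cast this
    rw [hset]
    simp

-- A's merge-then-clip total measures the clipped union of its up-intervals
theorem pvA_total (ps pe : Int) (ups : List (Int × Int)) :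
    (merge_intervals ups).foldl (pvClipStep ps pe) 0
      = ((pvU ups ∩ Finset.Ico ps pe).card : Int) := by
  unfold merge_intervals
  have hperm := PySem.List.sorted2_perm ups Prod.fst Prod.snd false
  cases hL : PySem.List.sorted2 ups Prod.fst Prod.snd with
  | nil =>
    rw [hL] at hperm
    have : ups = [] := hperm.symm.eq_nil
    subst this
    simp [pvU]
  | cons h t =>
    rw [hL] at hperm
    have hpw := pvSorted2_pairwise_fst ups
    rw [hL] at hpw
    have hpw' := (List.pairwise_cons.mp hpw).2
    have hhead := (List.pairwise_cons.mp hpw).1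
    have hU : pvU (h :: t) = pvU ups := by
      ext x
      rw [pvMem_U, pvMem_U]
      constructor
      · rintro ⟨iv, hm, hb⟩; exact ⟨iv, hperm.mem_iff.mp hm, hb⟩
      · rintro ⟨iv, hm, hb⟩; exact ⟨iv, hperm.mem_iff.mpr hm, hb⟩
    rw [pvClipStep_eq, PySem.List.foldl_add, zero_add]
    have hm : (match h :: t with
        | [] => ([] : List (Int × Int))
        | h :: t => List.foldl pvMergeStep [h] t)
        = List.foldl pvMergeStep ([] ++ [(h.1, h.2)]) t := rfl
    rw [hm, pvMergeA ps pe t [] h.1 h.2 hhead hpw']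
    have hIU : Finset.Ico h.1 h.2 ∪ pvU t = pvU (h :: t) := rfl
    rw [List.map_nil, List.sum_nil, zero_add, hIU, hU]

-- A's period fold computed componentwise over the relevant starts/ends
def pvOMin (o : Option Int) (s : Int) : Option Int :=
  match o with | none => some s | some m => if s < m then some s else some m
def pvOMax (o : Option Int) (s : Int) : Option Int :=
  match o with | none => some s | some m => if s > m then some s else some m

theorem pvPeriod_fold_eq (chargers : PySem.Set Int) (l : List (Int × Int × Int × Bool))
    (o1 o2 : Option Int) :
    l.foldl (pvPeriodStep chargers) (o1, o2) =
      (((l.filter (fun r => decide (r.1 ∈ chargers))).map (fun r => r.2.1)).foldl pvOMin o1,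
       ((l.filter (fun r => decide (r.1 ∈ chargers))).map (fun r => r.2.2.1)).foldl pvOMax o2) := by
  induction l generalizing o1 o2 with
  | nil => simp
  | cons r t ih =>
    by_cases h : r.1 ∈ chargers
    · simp [pvPeriodStep, h, ih, pvOMin, pvOMax]
    · simp [pvPeriodStep, h, ih]

theorem pvOMin_fold_some (xs : List Int) (m : Int) :
    xs.foldl pvOMin (some m) = some (xs.foldl min m) := by
  induction xs generalizing m with
  | nil => rfl
  | cons x t ih =>
    have : pvOMin (some m) x = some (min m x) := by
      simp only [pvOMin]; split_ifs <;> simp only [Option.some.injEq] <;> omega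
    simp [this, ih]

theorem pvOMax_fold_some (xs : List Int) (m : Int) :
    xs.foldl pvOMax (some m) = some (xs.foldl max m) := by
  induction xs generalizing m with
  | nil => rfl
  | cons x t ih =>
    have : pvOMax (some m) x = some (max m x) := by
      simp only [pvOMax]; split_ifs <;> simp only [Option.some.injEq] <;> omega
    simp [this, ih]

-- A's reporting period when no report matches the station
theorem pvPeriod_nil (sid : Int) (cids : List Int) (reports : List (Int × Int × Int × Bool))
    (h : reports.filter (fun r => decide (r.1 ∈ PySem.Set.ofList cids)) = []) :
    get_station_reporting_period sid cids reports = (0, 0) := by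
  unfold get_station_reporting_period
  dsimp only
  rw [pvPeriod_fold_eq, h]
  simp

-- A's reporting period = (min of starts, max of ends) over the relevant reports
theorem pvPeriod_cons (sid : Int) (cids : List Int) (reports : List (Int × Int × Int × Bool))
    (v : Int × Int) (vs : List (Int × Int))
    (h : (reports.filter (fun r => decide (r.1 ∈ PySem.Set.ofList cids))).map
          (fun r => (r.2.1, r.2.2.1)) = v :: vs) :
    get_station_reporting_period sid cids reports =
      ((vs.map Prod.fst).foldl min v.1, (vs.map Prod.snd).foldl max v.2) := by
  unfold get_station_reporting_period
  dsimp only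
  rw [pvPeriod_fold_eq]
  have h1 : (reports.filter (fun r => decide (r.1 ∈ PySem.Set.ofList cids))).map
      (fun r => r.2.1) = v.1 :: vs.map Prod.fst := by
    have := congrArg (List.map Prod.fst) h
    simpa [List.map_map, Function.comp] using this
  have h2 : (reports.filter (fun r => decide (r.1 ∈ PySem.Set.ofList cids))).map
      (fun r => r.2.2.1) = v.2 :: vs.map Prod.snd := by
    have := congrArg (List.map Prod.snd) h
    simpa [List.map_map, Function.comp] using this
  rw [h1, h2]
  simp only [List.foldl_cons]
  have e1 : pvOMin none v.1 = some v.1 := rfl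
  have e2 : pvOMax none v.2 = some v.2 := rfl
  rw [e1, e2, pvOMin_fold_some, pvOMax_fold_some]

-- ===== VERDICT (by name: the statement is the Claim_ definition above) =====
theorem calculate_station_uptime_spec : Claim_equal_calculate_station_uptime := by
  intro sid cids reports _
  unfold Spec_calculate_station_uptime calculate_station_uptime calculate_station_uptime_alt
  dsimp only
  rw [PySem.List.foldl_append_if]
  simp only [List.nil_append]
  cases hrel : (reports.filter (fun r => decide (r.1 ∈ PySem.Set.ofList cids))).map
      (fun r => (r.2.1, r.2.2.1)) with
  | nil =>
    have h0 : reports.filter (fun r => decide (r.1 ∈ PySem.Set.ofList cids)) = [] :=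
      List.map_eq_nil_iff.mp hrel
    rw [pvPeriod_nil sid cids reports h0]
    simp
  | cons v vs =>
    rw [pvPeriod_cons sid cids reports v vs hrel]
    have hmin : PySem.List.min? ((v :: vs).map Prod.fst) (fun x => x) =
        some ((vs.map Prod.fst).foldl min v.1) := by
      simp only [List.map_cons]
      exact PySem.List.min?_id_cons v.1 (vs.map Prod.fst)
    have hmax : PySem.List.max? ((v :: vs).map Prod.snd) (fun x => x) =
        some ((vs.map Prod.snd).foldl max v.2) := by
      simp only [List.map_cons]
      exact PySem.List.max?_id_cons v.2 (vs.map Prod.snd)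
    rw [hmin, hmax]
    set sm := (vs.map Prod.fst).foldl min v.1 with hsm
    set sM := (vs.map Prod.snd).foldl max v.2 with hsM
    by_cases hEq : sm = sM
    · simp [hEq]
    · simp only [hEq, if_false]
      rw [pvA_total sm sM _, pvB_total (PySem.Set.ofList cids) sm sM reports]
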